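-- pv_equiv track=rewrite | github.com/philsurette/androcles | src/inline_text_differ.py | _token_range_for_window
-- ===== SOURCE A (Python) =====
-- def _token_range_for_window(
--
--     expected_word_indices: list[int | None],
--     window_start: int,
--     window_end: int,
-- ) -> tuple[int, int]:
--     token_start = None
--     token_end = None
--     for idx, word_idx in enumerate(expected_word_indices):
--         if word_idx is None:
--             continue
--         if token_start is None and word_idx >= window_start:
--             token_start = idx
--         if word_idx <= window_end:
--             token_end = idx + 1
--     if token_start is None or token_end is None:
--         return 0, 0
--     return token_start, token_end
-- ===== SOURCE B (Python) =====
-- def _token_range_for_window(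
--     expected_word_indices: list[int | None],
--     window_start: int,
--     window_end: int,
-- ) -> tuple[int, int]:
--     token_start = next(
--         (i for i, w in enumerate(expected_word_indices)
--          if w is not None and w >= window_start),
--         None,
--     )
--     token_end = next(
--         (len(expected_word_indices) - k
--          for k, w in enumerate(reversed(expected_word_indices))
--          if w is not None and w <= window_end),
--         None,
--     )
--     return (0, 0) if token_start is None or token_end is None else (token_start, token_end)
-- ===== Notes on version B (the rewrite author's own statement) =====
-- stated objective: alternative
-- what changed: Replaces A's single full-list pass carrying two accumulators with two independent early-exit scans: a forward scan for the first matching index (token_start) and a reverse scan for the last matching index (token_end).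
import Mathlib
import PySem

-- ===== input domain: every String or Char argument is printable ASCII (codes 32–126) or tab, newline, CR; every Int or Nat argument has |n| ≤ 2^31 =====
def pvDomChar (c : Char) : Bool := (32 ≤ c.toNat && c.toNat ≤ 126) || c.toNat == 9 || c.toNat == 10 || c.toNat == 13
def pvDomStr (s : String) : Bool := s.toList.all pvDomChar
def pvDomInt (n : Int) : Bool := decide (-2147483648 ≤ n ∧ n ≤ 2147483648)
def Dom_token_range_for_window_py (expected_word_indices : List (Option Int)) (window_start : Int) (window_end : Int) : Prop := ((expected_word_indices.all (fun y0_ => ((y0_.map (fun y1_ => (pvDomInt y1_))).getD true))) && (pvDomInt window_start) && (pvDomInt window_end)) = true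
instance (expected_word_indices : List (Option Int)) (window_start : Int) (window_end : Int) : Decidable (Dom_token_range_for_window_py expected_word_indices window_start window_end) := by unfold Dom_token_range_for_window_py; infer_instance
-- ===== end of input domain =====

-- B replaces A's single accumulating pass by two independent early-exit scans
-- (forward for token_start, reverse for token_end); objective: alternative decomposition.

-- ===== PORT A =====
-- A's single for-loop over enumerate(...), carrying (token_start, token_end); idx carried as Int.
def pvALoop (window_start window_end : Int) :
    List (Option Int) → Int → Option Int × Option Int → Option Int × Option Int
  | [], _, s => s
  | x :: xs, i, (ts, te) =>
    match x with
    | none => pvALoop window_start window_end xs (i + 1) (ts, te)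
    | some w =>
      pvALoop window_start window_end xs (i + 1)
        ((if ts = none ∧ window_start ≤ w then some i else ts),
         (if w ≤ window_end then some (i + 1) else te))

def token_range_for_window_py (expected_word_indices : List (Option Int)) (window_start : Int) (window_end : Int) : Int × Int :=
  match pvALoop window_start window_end expected_word_indices 0 (none, none) with
  | (some a, some b) => (a, b)
  | _ => (0, 0)

-- ===== PORT B =====
-- forward scan with break: first index whose entry is not None and ≥ window_start
def pvBStart (window_start : Int) : List (Option Int) → Int → Option Int
  | [], _ => none
  | x :: xs, i =>
    match x with
    | some w => if window_start ≤ w then some i else pvBStart window_start xs (i + 1)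
    | none => pvBStart window_start xs (i + 1)
-- reverse scan with break ('enumerate(reversed(...))'), ported by walking the reversed
-- list while carrying v = len - k: first match from the end, returning len - k (= idx + 1)
def pvBEnd (window_end : Int) : List (Option Int) → Int → Option Int
  | [], _ => none
  | x :: xs, v =>
    match x with
    | some w => if w ≤ window_end then some v else pvBEnd window_end xs (v - 1)
    | none => pvBEnd window_end xs (v - 1)

def token_range_for_window_py_alt (expected_word_indices : List (Option Int)) (window_start : Int) (window_end : Int) : Int × Int :=
  match pvBStart window_start expected_word_indices 0 with
  | none => (0, 0)
  | some a =>
    match pvBEnd window_end expected_word_indices.reverse (expected_word_indices.length : Int) with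
    | none => (0, 0)
    | some b => (a, b)

-- ===== PRECONDITION & SPEC =====
def Spec_token_range_for_window_py (expected_word_indices : List (Option Int)) (window_start : Int) (window_end : Int) (out : Int × Int) : Prop := out = token_range_for_window_py_alt expected_word_indices window_start window_end
instance (expected_word_indices : List (Option Int)) (window_start : Int) (window_end : Int) (out : Int × Int) : Decidable (Spec_token_range_for_window_py expected_word_indices window_start window_end out) := by unfold Spec_token_range_for_window_py; infer_instance

-- ===== CLAIM (what is proved, stated in full; the proofs are below) =====
def Claim_equal_token_range_for_window_py : Prop := ∀ (expected_word_indices : List (Option Int)) (window_start : Int) (window_end : Int), Dom_token_range_for_window_py expected_word_indices window_start window_end → Spec_token_range_for_window_py expected_word_indices window_start window_end (token_range_for_window_py expected_word_indices window_start window_end)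

-- ===== LEMMAS AND PROOFS =====

-- A's loop updates its two components independently.
def pvA1 (window_start : Int) : List (Option Int) → Int → Option Int → Option Int
  | [], _, ts => ts
  | x :: xs, i, ts =>
    match x with
    | none => pvA1 window_start xs (i + 1) ts
    | some w => pvA1 window_start xs (i + 1) (if ts = none ∧ window_start ≤ w then some i else ts)

def pvA2 (window_end : Int) : List (Option Int) → Int → Option Int → Option Int
  | [], _, te => te
  | x :: xs, i, te =>
    match x with
    | none => pvA2 window_end xs (i + 1) te
    | some w => pvA2 window_end xs (i + 1) (if w ≤ window_end then some (i + 1) else te)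

-- last matching index (+1), computed by a forward recursion
def pvLastIdx (window_end : Int) : List (Option Int) → Int → Option Int
  | [], _ => none
  | x :: xs, i =>
    match pvLastIdx window_end xs (i + 1) with
    | some v => some v
    | none =>
      match x with
      | some w => if w ≤ window_end then some (i + 1) else none
      | none => none

theorem pvALoop_split (ws we : Int) (xs : List (Option Int)) :
    ∀ (i : Int) (ts te : Option Int),
      pvALoop ws we xs i (ts, te) = (pvA1 ws xs i ts, pvA2 we xs i te) := by
  induction xs with
  | nil => intro i ts te; simp [pvALoop, pvA1, pvA2]
  | cons x xs ih =>
    intro i ts te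
    cases x <;> simp [pvALoop, pvA1, pvA2, ih]

theorem pvA1_eq (ws : Int) (xs : List (Option Int)) :
    ∀ (i : Int) (ts : Option Int),
      pvA1 ws xs i ts = (match ts with | some a => some a | none => pvBStart ws xs i) := by
  induction xs with
  | nil => intro i ts; cases ts <;> simp [pvA1, pvBStart]
  | cons x xs ih =>
    intro i ts
    cases x with
    | none => simp [pvA1, pvBStart, ih]
    | some w =>
      cases ts with
      | some a => simp [pvA1, ih]
      | none =>
        by_cases h : ws ≤ w <;> simp [pvA1, pvBStart, h, ih]

theorem pvA2_eq (we : Int) (xs : List (Option Int)) :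
    ∀ (i : Int) (te : Option Int),
      pvA2 we xs i te = (match pvLastIdx we xs i with | some v => some v | none => te) := by
  induction xs with
  | nil => intro i te; simp [pvA2, pvLastIdx]
  | cons x xs ih =>
    intro i te
    cases x with
    | none =>
      simp only [pvA2, pvLastIdx, ih]
      cases pvLastIdx we xs (i + 1) <;> simp
    | some w =>
      by_cases h : w ≤ we <;>
        · simp only [pvA2, pvLastIdx, ih, h, if_pos, ite_false]
          cases pvLastIdx we xs (i + 1) <;> simp

theorem pvBEnd_append (we : Int) (l1 l2 : List (Option Int)) :
    ∀ (j : Int),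
      pvBEnd we (l1 ++ l2) j =
        (match pvBEnd we l1 j with
         | some v => some v
         | none => pvBEnd we l2 (j - l1.length)) := by
  induction l1 with
  | nil => intro j; simp [pvBEnd]
  | cons x xs ih =>
    intro j
    cases x with
    | none =>
      simp only [List.cons_append, pvBEnd, ih, List.length_cons]
      have : j - 1 - (xs.length : Int) = j - ((xs.length : Int) + 1) := by ring
      rw [show ((xs.length + 1 : Nat) : Int) = (xs.length : Int) + 1 by push_cast; ring, this]
    | some w =>
      by_cases h : w ≤ we
      · simp [pvBEnd, h]
      · simp only [List.cons_append, pvBEnd, h, ite_false, ih, List.length_cons]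
        have : j - 1 - (xs.length : Int) = j - ((xs.length : Int) + 1) := by ring
        rw [show ((xs.length + 1 : Nat) : Int) = (xs.length : Int) + 1 by push_cast; ring, this]

theorem pvBEnd_reverse (we : Int) (xs : List (Option Int)) :
    ∀ (i : Int),
      pvBEnd we xs.reverse (i + (xs.length : Int)) = pvLastIdx we xs i := by
  induction xs with
  | nil => intro i; simp [pvBEnd, pvLastIdx]
  | cons x xs ih =>
    intro i
    have hrev : (x :: xs).reverse = xs.reverse ++ [x] := by simp
    rw [hrev, pvBEnd_append]
    have hidx : i + ((x :: xs).length : Int) = (i + 1) + (xs.length : Int) := by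
      push_cast [List.length_cons]; ring
    rw [hidx, ih]
    have hidx2 : (i + 1) + (xs.length : Int) - ((xs.reverse).length : Int) = i + 1 := by
      simp only [List.length_reverse]; ring
    rw [hidx2]
    simp only [pvLastIdx]
    cases hL : pvLastIdx we xs (i + 1) with
    | some v => simp
    | none =>
      cases x with
      | none => simp [pvBEnd]
      | some w => by_cases h : w ≤ we <;> simp [pvBEnd, h]

-- ===== VERDICT (by name: the statement is the Claim_ definition above) =====
theorem token_range_for_window_py_spec : Claim_equal_token_range_for_window_py := by
  intro l ws we _
  unfold Spec_token_range_for_window_py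
  unfold token_range_for_window_py token_range_for_window_py_alt
  rw [pvALoop_split, pvA1_eq, pvA2_eq]
  have h := pvBEnd_reverse we l 0
  have h0 : (0 : Int) + (l.length : Int) = (l.length : Int) := by ring
  rw [h0] at h
  rw [h]
  cases pvBStart ws l 0 <;> cases pvLastIdx we l 0 <;> rfl
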